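/-
  THE CONTRACTS OF THE HEAP TOY (c/toyh/toyh.c): the smallest client of the base image's heap (ProgX/Spec/Heap.lean, Asan/Heap.lean).
  The names are those of the base-image platform (ProgX/Base/Spec/Basic.lean, ProgX/Base/Spec/Heap.lean): `ShadowPre` =
  `ProgX.Base.ShadowPre`, `LiveIn` = `ProgX.Base.LiveIn`, `HeapPre` = `ProgX.Base.Spec.HeapPre`.

  GHOST PARAMETERS. `clamp_length` (a leaf that touches no memory): `others`, `frames` — the live objects of the shadow invariant, as
  in the first toy. `prog_main` (a client of the heap): the heap `H`, the other live objects `rest` (globals, input, output), the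
  active protected frames `frames` — exactly the ghosts of `malloc.spec` / `free.spec`; the live list of the shadow layer is
  `H.liveObjs ++ rest`.

      function       own frame            callees (frame)                                                  frame
      clamp_length   —                    —                                                                    0
      prog_main      3 pushes = 24        clamp_length (0), malloc (32), memcpy (80), free (24)    24 + 8 + 80 = 112
      (c/toyh/toyh_STACK.txt has the same numbers; `free`'s 24 is the contract's, ProgX/Spec/Heap.lean: the table's 32 follows the
       never-taken call of the report routine)
-/
import ProgX.Base.Spec.Libc
import ProgX.Base.Spec.Heap
import Toyh.Spec.Runtime
import Toyh.Frames
import Toyh.Code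
import Toyh.Dec.All
namespace Toyh.Spec
open X86 X86.User Asan ProgX.Base ProgX.Base.Spec

/-- **`clamp_length(rdi = len)`**: `min(len, 64)`, and 0 for a negative `len`. A leaf without a frame: no memory access but the
`ret`'s. What the caller needs: the result is at most 64, and at most `len` when `len` is not negative (as a signed number:
below 2^63), so that `len` readable input bytes are enough for a copy of `result` bytes. (The first toy's contract, unchanged.) -/
def clamp_length.spec (others : List Obj) (frames : List (Nat × FrameLayout)) : Spec where
  pre u :=
    ShadowPre others frames u
  post u v :=
    (v.reg .rax).toNat ≤ 64 ∧
    ((u.reg .rdi).toNat < 2 ^ 63 → (v.reg .rax).toNat ≤ (u.reg .rdi).toNat) ∧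
    ShadowUntouched u.mem v.mem
  frame := 0
  writes _ := []

@[vspec] theorem clamp_length.spec_frame (others : List Obj) (frames : List (Nat × FrameLayout)) :
    (clamp_length.spec others frames).frame = 0 := id rfl

@[vspec] theorem clamp_length.spec_writes (others : List Obj) (frames : List (Nat × FrameLayout)) (u : State) :
    (clamp_length.spec others frames).writes u = [] := id rfl

/-- The global `runs`, which `prog_main` increments (an unchecked access: gcc knows it is in bounds). -/
def runsSpan : Span := ⟨Toyh.Globals.runs.beg, Toyh.Globals.runs.beg + 8⟩

/-- **What `prog_main` leaves behind**, for the `n = clamp_length(len)` bytes it asked for (`n ≤ 64`, and `n ≤ len`). BOTH outcomes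
of the allocation, decided by the ghost heap (`H.Fits (r16 n)`, as in `malloc`'s contract):
  ROOM: rax = n; the heap has one more object — `n` bytes at `H.next`, capacity `r16 n` —, and it is FREED:
    `(H.push n (r16 n)).release H.next`;
  NO ROOM: rax = 0; the heap is `H`.
In both the heap's invariant holds with the clean stack ending at `RA + 8` (the stack pointer after the `ret`), for the same other
objects `rest` and the same protected frames: the allocator can be used again, and every object that was live is live, untouched. -/
def ProgMainPost (H : Heap) (rest : List Obj) (frames : List (Nat × FrameLayout)) (u v : State) : Prop :=
  ∃ n, n ≤ 64 ∧ n ≤ (u.reg .rsi).toNat ∧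
    (H.Fits (r16 n) →
      (v.reg .rax).toNat = n ∧
      HeapInv ((H.push n (r16 n)).release H.next) rest frames ((u.reg .rsp).toNat + 8) v.mem) ∧
    (¬ H.Fits (r16 n) →
      v.reg .rax = 0 ∧
      HeapInv H rest frames ((u.reg .rsp).toNat + 8) v.mem)

/-- **`prog_main(rdi = in, rsi = len, rdx = out, rcx = cap, r8 = heap, r9 = heap_len)`**: `runs++ ; n = clamp_length(len) ;
p = malloc(n) ; if (!p) return 0 ; memcpy(p, in, n) ; free(p) ; return n`.

PRE. The common precondition of the heap's functions (`HeapPre`: the heap's invariant for `H`, `rest`, `frames` with the clean stack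
ending at `RA + 8`; the heap is `[800000H, C00000H)`; nothing live in the text); `len ≤ 1FF000H` (so `len` is not negative); `len = 0`,
or the `len` bytes at `in` lie inside ONE live object (of the heap, of `rest`, or of a protected frame). Nothing is asked about where
that object is: the new object `H.next` lies above every heap object there is (`HeapOK.next_above`), and every other live object
lies outside the heap's region (`HeapInv.restOut`, `HeapInv.stackObj_out`), so the copy never overlaps. `out`, `cap`, `heap`,
`heap_len` are not used. `runs` is accessed without a check (gcc knows the access is in bounds): only `Lay.Has`.

POST. `ProgMainPost`: both outcomes of the allocation.

FOOTPRINT. The control cell of the heap, the header of the new chunk (`free` rewrites its state word), the up to 64 bytes of the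
new object and their shadow (`malloc` unpoisons, `free` poisons), the global `runs`, and 112 bytes of stack. -/
def prog_main.spec (H : Heap) (rest : List Obj) (frames : List (Nat × FrameLayout)) : Spec where
  pre u :=
    HeapPre H rest frames u ∧
    (u.reg .rsi).toNat ≤ 0x1FF000 ∧
    ((u.reg .rsi).toNat = 0 ∨ LiveIn (H.liveObjs ++ rest) frames (u.reg .rdi).toNat (u.reg .rsi).toNat)
  post u v :=
    ProgMainPost H rest frames u v
  frame := 112
  writes _ :=
    [⟨0x800000, 0x800008⟩,
     ⟨H.next - 32, H.next - 8⟩,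
     ⟨H.next, H.next + 64⟩,
     shadowSpan H.next (H.next + 64),
     runsSpan]

@[vspec] theorem prog_main.spec_frame (H : Heap) (rest : List Obj) (frames : List (Nat × FrameLayout)) :
    (prog_main.spec H rest frames).frame = 112 := id rfl

@[vspec] theorem prog_main.spec_writes (H : Heap) (rest : List Obj) (frames : List (Nat × FrameLayout)) (u : State) :
    (prog_main.spec H rest frames).writes u =
      [⟨0x800000, 0x800008⟩,
       ⟨H.next - 32, H.next - 8⟩,
       ⟨H.next, H.next + 64⟩,
       shadowSpan H.next (H.next + 64),
       ⟨0x141900, 0x141908⟩] := id rfl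

end Toyh.Spec
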